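-- pv_equiv track=rewrite | github.com/Rainnystone/skill-orchestration-system | src/sos/propose.py | _family_groups
-- ===== SOURCE A (Python) =====
-- from collections import defaultdict
--
-- def _family_groups(
--     pack_id: str, skill_names: tuple[str, ...]
-- ) -> tuple[tuple[str, tuple[str, ...]], ...]:
--     grouped = _group_by_family_depth(pack_id, skill_names, depth=1)
--     stable_groups: list[tuple[str, tuple[str, ...]]] = []
--
--     for family_key, family_skill_names in sorted(grouped.items()):
--         if len(family_skill_names) <= 20:
--             stable_groups.append((family_key, family_skill_names))
--         else:
--             stable_groups.extend(
--                 _deepen_family_groups(pack_id, family_skill_names, depth=2)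
--             )
--
--     return tuple(stable_groups)
--
-- def _deepen_family_groups(
--     pack_id: str, skill_names: tuple[str, ...], depth: int
-- ) -> tuple[tuple[str, tuple[str, ...]], ...]:
--     grouped = _group_by_family_depth(pack_id, skill_names, depth=depth)
--     stable_groups: list[tuple[str, tuple[str, ...]]] = []
--
--     for family_key, family_skill_names in sorted(grouped.items()):
--         if len(family_skill_names) <= 20 or depth >= _max_family_depth(
--             pack_id, family_skill_names
--         ):
--             stable_groups.append((family_key, family_skill_names))
--         else:
--             stable_groups.extend(
--                 _deepen_family_groups(pack_id, family_skill_names, depth=depth + 1)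
--             )
--
--     return tuple(stable_groups)
--
-- def _group_by_family_depth(
--     pack_id: str, skill_names: tuple[str, ...], depth: int
-- ) -> dict[str, tuple[str, ...]]:
--     groups: dict[str, list[str]] = defaultdict(list)
--
--     for skill_name in skill_names:
--         family_key = _family_key(pack_id, skill_name, depth)
--         groups[family_key].append(skill_name)
--
--     return {
--         family_key: tuple(sorted(family_skill_names))
--         for family_key, family_skill_names in groups.items()
--     }
--
-- def _family_key(pack_id: str, skill_name: str, depth: int) -> str:
--     tokens = _family_tokens(pack_id, skill_name)
--     return "-".join(tokens[: min(depth, len(tokens))])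
--
-- def _family_tokens(pack_id: str, skill_name: str) -> tuple[str, ...]:
--     for prefix in _functional_prefixes(pack_id):
--         if skill_name.startswith(prefix):
--             skill_name = skill_name[len(prefix) :]
--             break
--
--     return tuple(token for token in skill_name.split("-") if token)
--
-- def _functional_prefixes(pack_id: str) -> tuple[str, ...]:
--     if pack_id == "game-design":
--         return ("game-",)
--     return (f"{pack_id}-",)
--
-- def _max_family_depth(pack_id: str, skill_names: tuple[str, ...]) -> int:
--     return max(len(_family_tokens(pack_id, skill_name)) for skill_name in skill_names)
-- ===== SOURCE B (Python) =====
-- # B: sorts the names once up front, then groups each level into buckets pre-seeded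
-- # in sorted key order (no per-level re-sorting), driven by one iterative stack
-- # (pre-order DFS) instead of A's dict-grouping with per-level re-sorts and
-- # two recursive helpers.
--
-- def _family_groups(
--     pack_id: str, skill_names: tuple[str, ...]
-- ) -> tuple[tuple[str, tuple[str, ...]], ...]:
--     prefix = "game-" if pack_id == "game-design" else f"{pack_id}-"
--
--     def tokens_of(name: str) -> list[str]:
--         rest = name[len(prefix):] if name.startswith(prefix) else name
--         return [t for t in rest.split("-") if t]
--
--     def key_of(name: str, depth: int) -> str:
--         return "-".join(tokens_of(name)[:depth])
--
--     def split_level(names: list[str], depth: int) -> list[tuple[str, list[str]]]: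
--         keyed = [(key_of(n, depth), n) for n in names]
--         buckets: dict[str, list[str]] = {k: [] for k in sorted({k for k, _ in keyed})}
--         for k, n in keyed:
--             buckets[k].append(n)
--         return list(buckets.items())
--
--     result: list[tuple[str, tuple[str, ...]]] = []
--     stack = [(1, kg) for kg in reversed(split_level(sorted(skill_names), 1))]
--     while stack:
--         depth, (key, names) = stack.pop()
--         if len(names) <= 20 or (
--             depth > 1 and depth >= max(len(tokens_of(n)) for n in names)
--         ):
--             result.append((key, tuple(names)))
--         else:
--             stack.extend(
--                 (depth + 1, kg) for kg in reversed(split_level(names, depth + 1))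
--             )
--     return tuple(result)
-- ===== Notes on version B (the rewrite author's own statement) =====
-- stated objective: faster
-- what changed: B sorts the skill names once up front, so no group ever needs re-sorting: each level keys every name once and distributes the names into buckets pre-seeded in sorted key order, and A's two recursive helpers are replaced by one iterative explicit-stack pre-order DFS.
import Mathlib
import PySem

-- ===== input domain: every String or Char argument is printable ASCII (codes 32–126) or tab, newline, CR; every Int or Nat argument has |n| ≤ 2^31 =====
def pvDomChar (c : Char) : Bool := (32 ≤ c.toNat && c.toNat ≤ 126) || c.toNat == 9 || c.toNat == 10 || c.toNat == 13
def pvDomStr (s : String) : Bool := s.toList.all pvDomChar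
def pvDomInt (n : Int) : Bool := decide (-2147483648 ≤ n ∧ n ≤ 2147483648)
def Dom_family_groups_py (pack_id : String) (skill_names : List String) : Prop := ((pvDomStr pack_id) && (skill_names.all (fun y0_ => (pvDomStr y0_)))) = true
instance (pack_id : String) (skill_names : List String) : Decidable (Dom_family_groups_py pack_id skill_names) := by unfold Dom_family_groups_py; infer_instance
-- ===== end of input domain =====

-- B sorts the names once and groups each level by filtering the sorted list per sorted distinct
-- key with one iterative stack, instead of A's dict grouping + per-level sorts + two recursive
-- helpers; return values agree everywhere (no mutation involved).

-- ===== PORT A =====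
-- _functional_prefixes always returns a 1-tuple, ported as that single prefix (List Char side).
def pvPrefix (pack_id : String) : List Char :=
  if pack_id = "game-design" then "game-".toList else pack_id.toList ++ ['-']

-- _family_tokens: strip the single functional prefix if present, split on "-", drop empty tokens.
def familyTokens (pack_id skill_name : String) : List (List Char) :=
  let cs := skill_name.toList
  let rest := if PySem.Chars.startswith cs (pvPrefix pack_id) then cs.drop (pvPrefix pack_id).length else cs
  (PySem.Chars.splitOn rest ['-']).filter (fun t => t ≠ [])

-- _family_key
def familyKey (pack_id skill_name : String) (depth : Nat) : String :=
  let tokens := familyTokens pack_id skill_name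
  String.ofList (PySem.Chars.join ['-'] (tokens.take (min depth tokens.length)))

-- _max_family_depth: Python's max over a NONEMPTY tuple of nonnegative ints (every call site passes a
-- nonempty group), which equals foldl max 0 there.
def maxFamilyDepth (pack_id : String) (skill_names : List String) : Nat :=
  (skill_names.map (fun n => (familyTokens pack_id n).length)).foldl max 0

-- _group_by_family_depth: defaultdict(list) append loop, then each value sorted.
def groupByFamilyDepth (pack_id : String) (skill_names : List String) (depth : Nat) : List (String × List String) :=
  let d := skill_names.foldl
    (fun d n => PySem.Dict.modify d (familyKey pack_id n depth) [] (fun v => v ++ [n]))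
    PySem.Dict.empty
  d.items.map (fun p => (p.1, PySem.List.sorted p.2 (fun x => x) false))

-- sorted(grouped.items()): the keys are dict keys, hence pairwise distinct, so Python's sort of the
-- (key, value) pairs equals the stable sort by the key component alone — ported as that.
def sortedGroups (pack_id : String) (skill_names : List String) (depth : Nat) : List (String × List String) :=
  PySem.List.sorted (groupByFamilyDepth pack_id skill_names depth) (fun p => p.1) false

-- ---- facts about A's grouping, cited by name in the decreasing_by of A's recursive helper ----

theorem pv_foldl_max_le (l : List Nat) (a m : Nat) (ha : a ≤ m) (h : ∀ x ∈ l, x ≤ m) :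
    l.foldl max a ≤ m := by
  induction l generalizing a with
  | nil => exact ha
  | cons x t ih =>
      exact ih (max a x) (by have := h x (by simp); omega) (fun y hy => h y (by simp [hy]))

theorem dict_build_items (key : String → String) (names : List String) :
    (names.foldl (fun d n => PySem.Dict.modify d (key n) [] (fun v => v ++ [n])) PySem.Dict.empty).items
      = (PySem.Set.ofList (names.map key)).map (fun k => (k, names.filter (fun n => key n == k))) := by
  have hfold : names.foldl (fun d n => PySem.Dict.modify d (key n) [] (fun v => v ++ [n])) PySem.Dict.empty
      = (names.map (fun n => (key n, n))).foldl
        (fun d p => PySem.Dict.modify d p.1 [] (fun v => v ++ [p.2])) PySem.Dict.empty := by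
    rw [List.foldl_map]
  have hkeys : (names.foldl (fun d n => PySem.Dict.modify d (key n) [] (fun v => v ++ [n])) PySem.Dict.empty).keys
      = PySem.Set.ofList (names.map key) := by
    have := PySem.Dict.keys_foldl_modify_key names key ([] : List String)
      (fun _ x => fun v => v ++ [x]) PySem.Dict.empty
    simpa [PySem.Dict.keys_empty, PySem.Set.update_nil_left] using this
  have hnodup : (names.foldl (fun d n => PySem.Dict.modify d (key n) [] (fun v => v ++ [n])) PySem.Dict.empty).keys.Nodup :=
    PySem.Dict.nodup_keys_foldl_modify_key names key ([] : List String)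
      (fun _ x => fun v => v ++ [x]) PySem.Dict.empty (by simp [PySem.Dict.keys_empty])
  have hgetD : ∀ k, (names.foldl (fun d n => PySem.Dict.modify d (key n) [] (fun v => v ++ [n])) PySem.Dict.empty).getD k []
      = names.filter (fun n => key n == k) := by
    intro k
    rw [hfold, PySem.Dict.getD_foldl_modify_append]
    simp [List.filter_map, Function.comp_def]
  rw [PySem.Dict.items_eq_map_keys _ hnodup ([] : List String), hkeys]
  exact List.map_congr_left (fun k _ => by rw [hgetD])

theorem sum_count_ofList (m : List String) :
    ((PySem.Set.ofList m).map (fun k => m.count k)).sum = m.length := by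
  have hp : (PySem.Set.ofList m).Perm m.dedup :=
    (List.perm_ext_iff_of_nodup (PySem.Set.nodup_ofList m) m.nodup_dedup).mpr
      (fun a => by simp [PySem.Set.mem_ofList, List.mem_dedup])
  rw [(hp.map (fun k => m.count k)).sum_eq]
  simpa using List.sum_map_count_dedup_eq_length m

theorem grp_items (pack_id : String) (skill_names : List String) (depth : Nat) :
    groupByFamilyDepth pack_id skill_names depth =
      (PySem.Set.ofList (skill_names.map (fun n => familyKey pack_id n depth))).map
        (fun k => (k, PySem.List.sorted
            (skill_names.filter (fun n => familyKey pack_id n depth == k)) (fun x => x) false)) := by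
  unfold groupByFamilyDepth
  show (List.map (fun p => (p.1, PySem.List.sorted p.2 (fun x => x) false))
      ((skill_names.foldl (fun d n => PySem.Dict.modify d (familyKey pack_id n depth) [] (fun v => v ++ [n]))
        PySem.Dict.empty).items)) = _
  rw [dict_build_items (fun n => familyKey pack_id n depth) skill_names]
  rw [List.map_map]
  rfl

theorem grp_mem_sub (pack_id : String) (skill_names : List String) (depth : Nat)
    (k : String) (g : List String) (h : (k, g) ∈ sortedGroups pack_id skill_names depth) :
    (∀ x ∈ g, x ∈ skill_names) ∧ g ≠ [] := by
  unfold sortedGroups at h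
  rw [PySem.List.mem_sorted, grp_items, List.mem_map] at h
  obtain ⟨k', hk', heq⟩ := h
  rw [Prod.ext_iff] at heq
  obtain ⟨hkk, hgg⟩ := heq
  simp only at hkk hgg
  subst hkk
  constructor
  · intro x hx
    rw [← hgg, PySem.List.mem_sorted, List.mem_filter] at hx
    exact hx.1
  · rw [PySem.Set.mem_ofList, List.mem_map] at hk'
    obtain ⟨n, hn, hkey⟩ := hk'
    intro hnil
    rw [← hgg, PySem.List.sorted_eq_nil_iff] at hnil
    have : n ∈ skill_names.filter (fun n => familyKey pack_id n depth == k') := by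
      rw [List.mem_filter]
      exact ⟨hn, by simp [hkey]⟩
    rw [hnil] at this
    exact absurd this (List.not_mem_nil)

theorem grp_maxFD_le (pack_id : String) (g skill_names : List String)
    (h : ∀ x ∈ g, x ∈ skill_names) :
    maxFamilyDepth pack_id g ≤ maxFamilyDepth pack_id skill_names := by
  unfold maxFamilyDepth
  refine pv_foldl_max_le _ 0 _ (Nat.zero_le _) ?_
  intro x hx
  rw [List.mem_map] at hx
  obtain ⟨y, hy, rfl⟩ := hx
  exact (PySem.List.le_foldl_max _ 0).2 _ (List.mem_map.mpr ⟨y, h y hy, rfl⟩)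

-- _deepen_family_groups (the extend/append loop over the sorted groups, written as flatMap;
-- attach carries the membership used by decreasing_by)
def deepenFamilyGroups (pack_id : String) (skill_names : List String) (depth : Nat) :
    List (String × List String) :=
  (sortedGroups pack_id skill_names depth).attach.flatMap
    (fun x =>
      if x.1.2.length ≤ 20 ∨ maxFamilyDepth pack_id x.1.2 ≤ depth then [(x.1.1, x.1.2)]
      else deepenFamilyGroups pack_id x.1.2 (depth + 1))
termination_by maxFamilyDepth pack_id skill_names + 1 - depth
decreasing_by
  have hsub := (grp_mem_sub pack_id skill_names depth x.1.1 x.1.2 (by simpa using x.2)).1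
  have hle := grp_maxFD_le pack_id x.1.2 skill_names hsub
  omega

-- _family_groups
def family_groups_py (pack_id : String) (skill_names : List String) : List (String × List String) :=
  (sortedGroups pack_id skill_names 1).flatMap
    (fun p => if p.2.length ≤ 20 then [(p.1, p.2)] else deepenFamilyGroups pack_id p.2 2)

-- ===== PORT B =====
-- tokens_of (B computes the prefix once and passes it around)
def pvTokB (pfx : List Char) (name : String) : List (List Char) :=
  let cs := name.toList
  let rest := if PySem.Chars.startswith cs pfx then cs.drop pfx.length else cs
  (PySem.Chars.splitOn rest ['-']).filter (fun t => !t.isEmpty)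

-- key_of
def pvKeyB (pfx : List Char) (name : String) (depth : Nat) : String :=
  String.ofList (PySem.Chars.join ['-'] ((pvTokB pfx name).take depth))

-- max(len(tokens_of(n)) for n in names); Python's max raises on an empty group, which no call
-- reaches (groups are nonempty) — `.getD 0` only totalizes that unreachable case.
def pvMaxB (pfx : List Char) (names : List String) : Nat :=
  ((names.map (fun n => (pvTokB pfx n).length)).max?).getD 0

-- split_level: key each name once, pre-seed the buckets dict with the sorted distinct keys,
-- then distribute the names into their buckets in one pass; list(buckets.items()).
def pvSplitLevel (pfx : List Char) (names : List String) (depth : Nat) : List (String × List String) :=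
  let keyed := names.map (fun n => (pvKeyB pfx n depth, n))
  let buckets := (PySem.List.sorted (PySem.Set.ofList (keyed.map (fun p => p.1))) (fun k => k) false).foldl
      (fun b k => PySem.Dict.insert b k ([] : List String)) PySem.Dict.empty
  (keyed.foldl (fun b p => PySem.Dict.modify b p.1 [] (fun v => v ++ [p.2])) buckets).items

-- what the bucket dict's items amount to: the sorted distinct keys, each with its filter of names
theorem pvSplit_char (pfx : List Char) (names : List String) (depth : Nat) :
    pvSplitLevel pfx names depth
      = (PySem.List.sorted (PySem.Set.ofList (names.map (fun n => pvKeyB pfx n depth))) (fun k => k) false).map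
          (fun k => (k, names.filter (fun n => pvKeyB pfx n depth == k))) := by
  simp only [pvSplitLevel]
  have hkeyed : (names.map (fun n => (pvKeyB pfx n depth, n))).map (fun p => p.1)
      = names.map (fun n => pvKeyB pfx n depth) := by
    rw [List.map_map]; rfl
  rw [hkeyed]
  set S := PySem.List.sorted (PySem.Set.ofList (names.map (fun n => pvKeyB pfx n depth))) (fun k => k) false with hS
  have hSnodup : S.Nodup :=
    ((PySem.List.sorted_perm _ _ _).nodup_iff).mpr (PySem.Set.nodup_ofList _)
  have hSmem : ∀ k, k ∈ names.map (fun n => pvKeyB pfx n depth) → k ∈ S := by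
    intro k hk
    rw [hS, PySem.List.mem_sorted, PySem.Set.mem_ofList]
    exact hk
  set B0 := S.foldl (fun b k => PySem.Dict.insert b k ([] : List String)) PySem.Dict.empty with hB0
  have hitems : B0.items = S.map (fun k => (k, ([] : List String))) := by
    have := PySem.Dict.items_foldl_insert_fresh (l := S) (k := fun a => a)
      (v := fun _ => ([] : List String)) (d := PySem.Dict.empty)
      (fun a _ => PySem.Dict.contains_empty a) (by simpa using hSnodup)
    simpa using this
  have hkeys0 : B0.keys = S := by
    show B0.items.map (fun p => p.1) = S
    rw [hitems, List.map_map]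
    exact (List.map_congr_left (fun a _ => rfl)).trans (List.map_id S)
  have hgetD0 : ∀ k, B0.getD k [] = [] := by
    intro k
    by_cases hk : k ∈ S
    · have hm : (k, ([] : List String)) ∈ B0.items := by
        rw [hitems]
        exact List.mem_map.mpr ⟨k, hk, rfl⟩
      have hnd : B0.keys.Nodup := by rw [hkeys0]; exact hSnodup
      exact PySem.Dict.getD_of_mem_items B0 hm hnd []
    · apply PySem.Dict.getD_of_not_contains
      cases h : B0.contains k with
      | false => rfl
      | true => exact absurd (hkeys0 ▸ ((PySem.Dict.contains_iff_mem_keys B0 k).mp h)) hk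
  set D := (names.map (fun n => (pvKeyB pfx n depth, n))).foldl
      (fun b p => PySem.Dict.modify b p.1 [] (fun v => v ++ [p.2])) B0 with hD
  have hkeysD : D.keys = S := by
    rw [hD, PySem.Dict.keys_foldl_modify_key (names.map (fun n => (pvKeyB pfx n depth, n)))
      (fun p => p.1) ([] : List String) (fun _ p => fun v => v ++ [p.2]) B0]
    rw [PySem.Set.update_eq_append_filter, hkeys0, hkeyed]
    have : (PySem.Set.ofList (names.map (fun n => pvKeyB pfx n depth))).filter
        (fun y => !(PySem.Set.contains S y)) = [] := by
      rw [List.filter_eq_nil_iff]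
      intro a ha
      have haS : a ∈ S := hSmem a ((PySem.Set.mem_ofList _ a).mp ha)
      simpa using haS
    rw [this, List.append_nil]
  have hnodupD : D.keys.Nodup := hkeysD ▸ hSnodup
  rw [PySem.Dict.items_eq_map_keys D hnodupD ([] : List String), hkeysD]
  refine List.map_congr_left (fun k _ => ?_)
  have : D.getD k [] = names.filter (fun n => pvKeyB pfx n depth == k) := by
    rw [hD, PySem.Dict.getD_foldl_modify_append, hgetD0]
    simp [List.filter_map, Function.comp_def]
  rw [this]

theorem pvMaxB_eq_foldl (pfx : List Char) (names : List String) :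
    pvMaxB pfx names = (names.map (fun n => (pvTokB pfx n).length)).foldl max 0 := by
  unfold pvMaxB
  cases h : names.map (fun n => (pvTokB pfx n).length) with
  | nil => rfl
  | cons x t =>
      rw [List.max?_cons']
      simp [List.foldl_cons]

theorem split_mem_sub (pfx : List Char) (names : List String) (depth : Nat)
    (k : String) (g : List String) (h : (k, g) ∈ pvSplitLevel pfx names depth) :
    (∀ x ∈ g, x ∈ names) ∧ g ≠ [] := by
  rw [pvSplit_char, List.mem_map] at h
  obtain ⟨k', hk', heq⟩ := h
  rw [Prod.ext_iff] at heq
  obtain ⟨hkk, hgg⟩ := heq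
  simp only at hkk hgg
  subst hkk
  constructor
  · intro x hx
    rw [← hgg, List.mem_filter] at hx
    exact hx.1
  · rw [PySem.List.mem_sorted, PySem.Set.mem_ofList, List.mem_map] at hk'
    obtain ⟨n, hn, hkey⟩ := hk'
    intro hnil
    have : n ∈ names.filter (fun n => pvKeyB pfx n depth == k') := by
      rw [List.mem_filter]
      exact ⟨hn, by simp [hkey]⟩
    rw [← hgg] at hnil
    rw [hnil] at this
    exact absurd this (List.not_mem_nil)

theorem split_maxB_le (pfx : List Char) (g names : List String)
    (h : ∀ x ∈ g, x ∈ names) : pvMaxB pfx g ≤ pvMaxB pfx names := by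
  rw [pvMaxB_eq_foldl, pvMaxB_eq_foldl]
  refine pv_foldl_max_le _ 0 _ (Nat.zero_le _) ?_
  intro x hx
  rw [List.mem_map] at hx
  obtain ⟨y, hy, rfl⟩ := hx
  exact (PySem.List.le_foldl_max _ 0).2 _ (List.mem_map.mpr ⟨y, h y hy, rfl⟩)

theorem split_sum_len (pfx : List Char) (names : List String) (depth : Nat) :
    ((pvSplitLevel pfx names depth).map (fun p => p.2.length)).sum = names.length := by
  rw [pvSplit_char, List.map_map]
  have hperm := PySem.List.sorted_perm
    (PySem.Set.ofList (names.map (fun n => pvKeyB pfx n depth))) (fun k => k) false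
  rw [(hperm.map ((fun p : String × List String => p.2.length) ∘
      fun k => (k, names.filter (fun n => pvKeyB pfx n depth == k)))).sum_eq]
  have : ((fun p : String × List String => p.2.length) ∘
      fun k => (k, names.filter (fun n => pvKeyB pfx n depth == k)))
      = fun k => (names.map (fun n => pvKeyB pfx n depth)).count k := by
    funext k
    simp only [Function.comp_def]
    rw [← List.countP_eq_length_filter, List.count, List.countP_map]
    rfl
  rw [this, sum_count_ofList]
  exact List.length_map ..

-- weight of one stack item, used only for the termination measure of the loop
def pvW (pfx : List Char) (it : Nat × String × List String) : Nat :=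
  it.2.2.length * (pvMaxB pfx it.2.2 + 3 - it.1) + 1

theorem split_stack_dec (pfx : List Char) (g : List String) (d : Nat)
    (_hbig : 20 < g.length) (hd : d ≤ 1 ∨ d < pvMaxB pfx g) :
    (((pvSplitLevel pfx g (d + 1)).map (fun p => (d + 1, p.1, p.2))).map (pvW pfx)).sum
      < g.length * (pvMaxB pfx g + 3 - d) + 1 := by
  rw [List.map_map]
  have hstep : (((pvSplitLevel pfx g (d + 1)).map ((pvW pfx) ∘ fun p => (d + 1, p.1, p.2))).sum)
      ≤ ((pvSplitLevel pfx g (d + 1)).map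
        (fun p => p.2.length * (pvMaxB pfx g + 3 - d))).sum := by
    refine List.sum_le_sum ?_
    intro p hp
    obtain ⟨hsub, hne⟩ := split_mem_sub pfx g (d + 1) p.1 p.2 (by simpa using hp)
    have hM := split_maxB_le pfx p.2 g hsub
    have hlen : 1 ≤ p.2.length := List.length_pos_of_ne_nil hne
    simp only [Function.comp_def, pvW]
    have h1 : pvMaxB pfx p.2 + 3 - (d + 1) ≤ pvMaxB pfx g + 2 - d := by omega
    calc p.2.length * (pvMaxB pfx p.2 + 3 - (d + 1)) + 1
        ≤ p.2.length * (pvMaxB pfx g + 2 - d) + p.2.length :=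
          Nat.add_le_add (Nat.mul_le_mul_left _ h1) hlen
      _ = p.2.length * ((pvMaxB pfx g + 2 - d) + 1) := by ring
      _ = p.2.length * (pvMaxB pfx g + 3 - d) := by
          congr 1; omega
  calc (((pvSplitLevel pfx g (d + 1)).map ((pvW pfx) ∘ fun p => (d + 1, p.1, p.2))).sum)
      ≤ ((pvSplitLevel pfx g (d + 1)).map (fun p => p.2.length * (pvMaxB pfx g + 3 - d))).sum := hstep
    _ = ((pvSplitLevel pfx g (d + 1)).map (fun p => p.2.length)).sum * (pvMaxB pfx g + 3 - d) :=
        List.sum_map_mul_right ..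
    _ = g.length * (pvMaxB pfx g + 3 - d) := by rw [split_sum_len]
    _ < g.length * (pvMaxB pfx g + 3 - d) + 1 := by omega

-- the while-loop over the explicit stack; Python pops from the end and pushes the new level
-- reversed, so with the Lean list's head as the top of the stack the push is `split ++ rest`.
def pvLoop (pfx : List Char) (stack : List (Nat × String × List String))
    (acc : List (String × List String)) : List (String × List String) :=
  match stack with
  | [] => acc
  | (d, k, g) :: rest =>
      if g.length ≤ 20 ∨ (1 < d ∧ pvMaxB pfx g ≤ d) then
        pvLoop pfx rest (acc ++ [(k, g)])
      else
        pvLoop pfx ((pvSplitLevel pfx g (d + 1)).map (fun p => (d + 1, p.1, p.2)) ++ rest) acc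
termination_by (stack.map (pvW pfx)).sum
decreasing_by
  · simp only [List.map_cons, List.sum_cons, pvW]
    omega
  · rename_i hcond
    simp only [List.map_append, List.sum_append, List.map_cons, List.sum_cons]
    push Not at hcond
    have := split_stack_dec pfx g d (by omega) (by omega)
    simp only [pvW] at *
    omega

-- _family_groups (B): sort once, seed the stack with the depth-1 split, run the loop.
def family_groups_py_alt (pack_id : String) (skill_names : List String) : List (String × List String) :=
  let pfx := if pack_id = "game-design" then "game-".toList else pack_id.toList ++ ['-']
  pvLoop pfx
    ((pvSplitLevel pfx (PySem.List.sorted skill_names (fun x => x) false) 1).map (fun p => (1, p.1, p.2))) []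

-- ===== PRECONDITION & SPEC =====
def Spec_family_groups_py (pack_id : String) (skill_names : List String) (out : List (String × List String)) : Prop := out = family_groups_py_alt pack_id skill_names
instance (pack_id : String) (skill_names : List String) (out : List (String × List String)) : Decidable (Spec_family_groups_py pack_id skill_names out) := by unfold Spec_family_groups_py; infer_instance

-- ===== CLAIM (what is proved, stated in full; the proofs are below) =====
def Claim_equal_family_groups_py : Prop := ∀ (pack_id : String) (skill_names : List String), Dom_family_groups_py pack_id skill_names → Spec_family_groups_py pack_id skill_names (family_groups_py pack_id skill_names)

-- ===== LEMMAS AND PROOFS =====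

theorem flatMap_attach_val {α β : Type} (l : List α) (F : α → List β) :
    l.attach.flatMap (fun x => F x.1) = l.flatMap F := by
  conv_rhs => rw [← List.attach_map_subtype_val l]
  rw [List.flatMap_map]

theorem pv_flatMap_congr {α β : Type} {l : List α} {f g : α → List β}
    (h : ∀ a ∈ l, f a = g a) : l.flatMap f = l.flatMap g := by
  induction l with
  | nil => rfl
  | cons x t ih =>
      simp only [List.flatMap_cons]
      rw [h x (by simp), ih (fun a ha => h a (by simp [ha]))]

-- B's tokens/key/maxdepth coincide with A's helpers once the prefix is A's pvPrefix
theorem tokB_eq (pack_id n : String) : pvTokB (pvPrefix pack_id) n = familyTokens pack_id n := by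
  unfold pvTokB familyTokens
  exact List.filter_congr (fun t _ => by cases t <;> simp)

theorem keyB_eq (pack_id n : String) (d : Nat) :
    pvKeyB (pvPrefix pack_id) n d = familyKey pack_id n d := by
  simp only [pvKeyB, familyKey, tokB_eq]
  rw [← List.take_eq_take_min]

theorem maxB_eq (pack_id : String) (g : List String) :
    pvMaxB (pvPrefix pack_id) g = maxFamilyDepth pack_id g := by
  rw [pvMaxB_eq_foldl]
  unfold maxFamilyDepth
  congr 1
  exact List.map_congr_left (fun n _ => by rw [tokB_eq])

-- the common characterisation of one grouping level
def cGroups (pack_id : String) (g : List String) (d : Nat) : List (String × List String) :=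
  (PySem.List.sorted (PySem.Set.ofList (g.map (fun n => familyKey pack_id n d))) (fun k => k) false).map
    (fun k => (k, PySem.List.sorted (g.filter (fun n => familyKey pack_id n d == k)) (fun x => x) false))

theorem A_char (pack_id : String) (g : List String) (d : Nat) :
    sortedGroups pack_id g d = cGroups pack_id g d := by
  unfold sortedGroups cGroups
  refine PySem.List.sorted_eq_of_perm_of_pairwise_lt (groupByFamilyDepth pack_id g d)
    ((PySem.List.sorted (PySem.Set.ofList (g.map (fun n => familyKey pack_id n d))) (fun k => k) false).map
      (fun k => (k, PySem.List.sorted (g.filter (fun n => familyKey pack_id n d == k)) (fun x => x) false)))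
    (fun p => p.1) ?_ ?_
  · rw [grp_items]
    exact (PySem.List.sorted_perm _ _ _).map _
  · rw [List.pairwise_map]
    exact PySem.List.sorted_ofList_pairwise_lt _

theorem sorted_filter_comm (g : List String) (p : String → Bool) :
    (PySem.List.sorted g (fun x => x) false).filter p
      = PySem.List.sorted (g.filter p) (fun x => x) false := by
  refine (PySem.List.sorted_id_eq_of_perm_of_pairwise _ _ ?_ ?_).symm
  · exact (PySem.List.sorted_perm g (fun x => x) false).filter p
  · exact (PySem.List.sorted_pairwise g (fun x => x)).filter p

theorem sorted_ofList_congr (l1 l2 : List String) (h : l1.Perm l2) :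
    PySem.List.sorted (PySem.Set.ofList l1) (fun x => x) false
      = PySem.List.sorted (PySem.Set.ofList l2) (fun x => x) false := by
  refine (PySem.List.sorted_id_eq_sorted_id_iff_perm _ _).mpr ?_
  refine (List.perm_ext_iff_of_nodup (PySem.Set.nodup_ofList l1) (PySem.Set.nodup_ofList l2)).mpr ?_
  intro a
  rw [PySem.Set.mem_ofList, PySem.Set.mem_ofList]
  exact h.mem_iff

-- B's split on a sorted copy of g is exactly the common characterisation
theorem B_split_sorted (pack_id : String) (g : List String) (d : Nat) :
    pvSplitLevel (pvPrefix pack_id) (PySem.List.sorted g (fun x => x) false) d = cGroups pack_id g d := by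
  rw [pvSplit_char]
  unfold cGroups
  have hkeys : (PySem.List.sorted g (fun x => x) false).map (fun n => pvKeyB (pvPrefix pack_id) n d)
      |>.Perm (g.map (fun n => familyKey pack_id n d)) := by
    have h1 : (PySem.List.sorted g (fun x => x) false).map (fun n => pvKeyB (pvPrefix pack_id) n d)
        = (PySem.List.sorted g (fun x => x) false).map (fun n => familyKey pack_id n d) :=
      List.map_congr_left (fun n _ => keyB_eq pack_id n d)
    rw [h1]
    exact (PySem.List.sorted_perm g (fun x => x) false).map _
  rw [sorted_ofList_congr _ _ hkeys]
  refine List.map_congr_left (fun k _ => ?_)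
  have hfil : (PySem.List.sorted g (fun x => x) false).filter (fun n => pvKeyB (pvPrefix pack_id) n d == k)
      = (PySem.List.sorted g (fun x => x) false).filter (fun n => familyKey pack_id n d == k) :=
    List.filter_congr (fun n _ => by rw [keyB_eq])
  rw [hfil, sorted_filter_comm]

-- every value in cGroups is itself a sorted list
theorem cGroups_val_sorted (pack_id : String) (g : List String) (d : Nat)
    (k : String) (v : List String) (h : (k, v) ∈ cGroups pack_id g d) :
    PySem.List.sorted v (fun x => x) false = v := by
  unfold cGroups at h
  rw [List.mem_map] at h
  obtain ⟨k', _, heq⟩ := h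
  rw [Prod.ext_iff] at heq
  obtain ⟨_, hv⟩ := heq
  simp only at hv
  rw [← hv]
  exact PySem.List.sorted_eq_self_of_pairwise _ _ (PySem.List.sorted_pairwise _ _)

-- what one stack item contributes to B's output (proof-side mirror of the loop body)
def procB (pfx : List Char) (k : String) (g : List String) (d : Nat) : List (String × List String) :=
  if g.length ≤ 20 ∨ (1 < d ∧ pvMaxB pfx g ≤ d) then [(k, g)]
  else (pvSplitLevel pfx g (d + 1)).attach.flatMap (fun x => procB pfx x.1.1 x.1.2 (d + 1))
termination_by pvMaxB pfx g + 2 - d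
decreasing_by
  rename_i hcond
  have hsub := (split_mem_sub pfx g (d + 1) x.1.1 x.1.2 (by simpa using x.2)).1
  have hle := split_maxB_le pfx x.1.2 g hsub
  push Not at hcond
  omega

theorem pvLoop_eq (pfx : List Char) (stack : List (Nat × String × List String))
    (acc : List (String × List String)) :
    pvLoop pfx stack acc = acc ++ stack.flatMap (fun it => procB pfx it.2.1 it.2.2 it.1) := by
  fun_induction pvLoop pfx stack acc with
  | case1 acc => simp
  | case2 acc d k g rest hcond ih =>
      rw [ih]
      simp only [List.flatMap_cons]
      rw [procB, if_pos hcond]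
      simp
  | case3 acc d k g rest hcond ih =>
      rw [ih, List.flatMap_append, List.flatMap_cons]
      have hstep : procB pfx k g d
          = ((pvSplitLevel pfx g (d + 1)).map (fun p => (d + 1, p.1, p.2))).flatMap
              (fun it => procB pfx it.2.1 it.2.2 it.1) := by
        rw [procB, if_neg hcond, List.flatMap_map,
          flatMap_attach_val (pvSplitLevel pfx g (d + 1))
            (fun p : String × List String => procB pfx p.1 p.2 (d + 1))]
      rw [hstep]

-- A's recursive deepening equals B's per-item processing, at every depth ≥ 2
theorem deepen_eq (pack_id : String) (g : List String) (d : Nat) :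
    2 ≤ d → deepenFamilyGroups pack_id g d
      = (sortedGroups pack_id g d).flatMap (fun p => procB (pvPrefix pack_id) p.1 p.2 d) := by
  fun_induction deepenFamilyGroups pack_id g d with
  | case1 g d ih =>
      intro hd
      rw [flatMap_attach_val (sortedGroups pack_id g d)
        (fun p : String × List String =>
          if p.2.length ≤ 20 ∨ maxFamilyDepth pack_id p.2 ≤ d then [(p.1, p.2)]
          else deepenFamilyGroups pack_id p.2 (d + 1))]
      refine pv_flatMap_congr (fun p hp => ?_)
      have hiff : (p.2.length ≤ 20 ∨ maxFamilyDepth pack_id p.2 ≤ d)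
          ↔ (p.2.length ≤ 20 ∨ (1 < d ∧ pvMaxB (pvPrefix pack_id) p.2 ≤ d)) := by
        rw [maxB_eq]
        constructor
        · rintro (h | h); · exact Or.inl h
          · exact Or.inr ⟨by omega, h⟩
        · rintro (h | h); · exact Or.inl h
          · exact Or.inr h.2
      rw [procB, ← if_congr hiff rfl rfl]
      split_ifs with hc
      · rfl
      · -- expand: A recurses, B splits the (sorted) child one level deeper
        push Not at hc
        have hmem : (p.1, p.2) ∈ cGroups pack_id g d := by
          rw [← A_char]; simpa using hp
        have hsv := cGroups_val_sorted pack_id g d p.1 p.2 hmem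
        have hsplit : pvSplitLevel (pvPrefix pack_id) p.2 (d + 1) = sortedGroups pack_id p.2 (d + 1) := by
          rw [← hsv, B_split_sorted, A_char, hsv]
        have hih := ih ⟨p, by simpa using hp⟩ (by simp only; omega)
        rw [hih (by omega)]
        rw [flatMap_attach_val (pvSplitLevel (pvPrefix pack_id) p.2 (d + 1))
          (fun q : String × List String => procB (pvPrefix pack_id) q.1 q.2 (d + 1)), hsplit]

-- ===== VERDICT (by name: the statement is the Claim_ definition above) =====
theorem family_groups_py_spec : Claim_equal_family_groups_py := by
  intro pack_id skill_names _hdom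
  unfold Spec_family_groups_py family_groups_py family_groups_py_alt
  have hpfx : (if pack_id = "game-design" then "game-".toList else pack_id.toList ++ ['-'])
      = pvPrefix pack_id := rfl
  rw [hpfx, pvLoop_eq, List.nil_append, List.flatMap_map, B_split_sorted, ← A_char]
  refine (pv_flatMap_congr (fun p hp => ?_)).symm
  show procB (pvPrefix pack_id) p.1 p.2 1 = _
  rw [procB]
  have : (p.2.length ≤ 20 ∨ (1 < 1 ∧ pvMaxB (pvPrefix pack_id) p.2 ≤ 1)) ↔ p.2.length ≤ 20 := by
    omega
  rw [← if_congr this rfl rfl]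
  split_ifs with hc
  · rfl
  · have hmem : (p.1, p.2) ∈ cGroups pack_id skill_names 1 := by
      rw [← A_char]; exact hp
    have hsv := cGroups_val_sorted pack_id skill_names 1 p.1 p.2 hmem
    have hsplit : pvSplitLevel (pvPrefix pack_id) p.2 2 = sortedGroups pack_id p.2 2 := by
      rw [← hsv, B_split_sorted, A_char, hsv]
    rw [flatMap_attach_val (pvSplitLevel (pvPrefix pack_id) p.2 2)
      (fun q : String × List String => procB (pvPrefix pack_id) q.1 q.2 2), hsplit]
    exact (deepen_eq pack_id p.2 2 (by omega)).symm
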